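-- pv_equiv track=rewrite | github.com/qin-work/ccm_benchmate | ccm_benchmate/genome/utils.py | parse_gtf_attributes
-- ===== SOURCE A (Python) =====
-- def parse_gtf_attributes(attributes_str):
--     """
--     parse the gtf attributes column that is the last one
--     :param attributes_str:
--     :return:
--     """
--     attributes = {}
--     for item in attributes_str.strip().split(';'):
--         item = item.strip()
--         if not item:
--             continue
--         parts = item.split(' ', 1)
--         if len(parts) == 2:
--             key = parts[0].strip()
--             value = parts[1].strip().strip('"')
--             attributes[key] = value
--     return attributes
-- ===== SOURCE B (Python) =====
-- def parse_gtf_attributes(attributes_str):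
--     """
--     parse the gtf attributes column that is the last one
--     :param attributes_str:
--     :return:
--     """
--     attributes = {}
--     buf = []
--     for ch in attributes_str + ';':
--         if ch == ';':
--             item = ''.join(buf).strip()
--             buf = []
--             sp = item.find(' ')
--             if sp != -1:
--                 attributes[item[:sp].strip()] = item[sp + 1:].strip().strip('"')
--         else:
--             buf.append(ch)
--     return attributes
-- ===== Notes on version B (the rewrite author's own statement) =====
-- stated objective: alternative
-- what changed: B replaces A's staged pipeline (strip the whole string, split on ';', then re-split each item at the first space) by a single character-level pass: it streams over attributes_str + ';' with a buffer accumulator and, at each ';', flushes the buffered chunk (strip, locate the first space, strip quotes) directly into the dict, so no split call or intermediate list of items is ever built.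
import Mathlib
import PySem

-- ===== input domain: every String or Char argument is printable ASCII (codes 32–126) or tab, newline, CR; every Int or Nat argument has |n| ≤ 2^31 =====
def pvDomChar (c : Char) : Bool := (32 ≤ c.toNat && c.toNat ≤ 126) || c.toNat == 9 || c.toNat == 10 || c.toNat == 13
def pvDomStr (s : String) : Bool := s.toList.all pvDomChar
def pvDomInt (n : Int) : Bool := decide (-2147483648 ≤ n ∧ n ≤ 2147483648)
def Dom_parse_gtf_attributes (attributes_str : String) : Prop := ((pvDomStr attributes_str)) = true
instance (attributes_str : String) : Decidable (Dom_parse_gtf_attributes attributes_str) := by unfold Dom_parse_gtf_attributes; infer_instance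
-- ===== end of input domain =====

-- B replaces A's staged strip/split(';')/split-per-item pipeline by a single character-level
-- pass with an accumulator that flushes each ';'-terminated chunk into the dict (objective:
-- alternative decomposition, same cost).

-- ===== PORT A =====
-- helper: the body of A's for-loop (per-item dict update)
def pvItemA (attributes : PySem.Dict String String) (item0 : List Char) : PySem.Dict String String :=
  let item := PySem.Chars.strip item0
  if item.isEmpty then attributes
  else
    match PySem.Chars.splitOnMax item [' '] 1 with
    | [p0, p1] =>
        PySem.Dict.insert attributes (String.ofList (PySem.Chars.strip p0))
          (String.ofList (PySem.Chars.stripChars (PySem.Chars.strip p1) ['"']))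
    | _ => attributes

def parse_gtf_attributes (attributes_str : String) : List (String × String) :=
  ((PySem.Chars.splitOn (PySem.Chars.strip attributes_str.toList) [';']).foldl pvItemA ⟨[]⟩).items

-- ===== PORT B =====
-- helper: B's flush of the accumulated chunk at a ';' (or at the appended final ';')
def pvFlush (attributes : PySem.Dict String String) (buf : List Char) : PySem.Dict String String :=
  let item := PySem.Chars.strip buf
  let sp := PySem.Chars.find item [' ']
  if sp ≠ -1 then
    PySem.Dict.insert attributes
      (String.ofList (PySem.Chars.strip (PySem.Chars.slice item none (some sp))))
      (String.ofList (PySem.Chars.stripChars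
        (PySem.Chars.strip (PySem.Chars.slice item (some (sp + 1)) none)) ['"']))
  else attributes

-- helper: the body of B's for-loop over the characters of attributes_str + ';'
def pvStep (st : PySem.Dict String String × List Char) (ch : Char) :
    PySem.Dict String String × List Char :=
  if ch = ';' then (pvFlush st.1 st.2, []) else (st.1, st.2 ++ [ch])

def parse_gtf_attributes_alt (attributes_str : String) : List (String × String) :=
  (((attributes_str ++ ";").toList.foldl pvStep ((⟨[]⟩ : PySem.Dict String String), [])).1).items

-- ===== PRECONDITION & SPEC =====
def Spec_parse_gtf_attributes (attributes_str : String) (out : List (String × String)) : Prop := out = parse_gtf_attributes_alt attributes_str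
instance (attributes_str : String) (out : List (String × String)) : Decidable (Spec_parse_gtf_attributes attributes_str out) := by unfold Spec_parse_gtf_attributes; infer_instance

-- ===== CLAIM (what is proved, stated in full; the proofs are below) =====
def Claim_equal_parse_gtf_attributes : Prop := ∀ (attributes_str : String), Dom_parse_gtf_attributes attributes_str → Spec_parse_gtf_attributes attributes_str (parse_gtf_attributes attributes_str)

-- ===== LEMMAS AND PROOFS =====

-- the (key, value) pair a stripped item contributes, if any
def pvG (it : List Char) : Option (String × String) :=
  if ' ' ∈ it then
    some (String.ofList (PySem.Chars.strip (it.take (it.findIdx (· == ' ')))),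
          String.ofList (PySem.Chars.stripChars
            (PySem.Chars.strip (it.drop (it.findIdx (· == ' ') + 1))) ['"']))
  else none

-- per-item dict update through pvG
def pvH (d : PySem.Dict String String) (it : List Char) : PySem.Dict String String :=
  match pvG it with
  | none => d
  | some kv => PySem.Dict.insert d kv.1 kv.2

theorem pvFind_go_space (it : List Char) (k : Nat) :
    PySem.Chars.find.go [' '] it k =
      if ' ' ∈ it then ((k + it.findIdx (· == ' ') : Nat) : Int) else -1 := by
  induction it generalizing k with
  | nil => simp [PySem.Chars.find.go]
  | cons c t ih =>
    rw [PySem.Chars.find.go]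
    by_cases hc : c = ' '
    · subst hc; simp [List.isPrefixOf, List.findIdx_cons]
    · have hb : (c == ' ') = false := beq_eq_false_iff_ne.mpr hc
      have hb2 : (' ' == c) = false := beq_eq_false_iff_ne.mpr (Ne.symm hc)
      have hpre : List.isPrefixOf [' '] (c :: t) = false := by simp [List.isPrefixOf, hb2]
      rw [hpre]
      simp only [Bool.false_eq_true, if_false, ih]
      by_cases ht : ' ' ∈ t
      · have hm : ' ' ∈ c :: t := List.mem_cons_of_mem _ ht
        rw [if_pos ht, if_pos hm, List.findIdx_cons, hb]
        norm_cast
        simp only [cond_false]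
        omega
      · have hm : ' ' ∉ c :: t := by
          intro h; rcases List.mem_cons.mp h with h1 | h2
          · exact hc h1.symm
          · exact ht h2
        rw [if_neg ht, if_neg hm]

theorem pvFind_space (it : List Char) :
    PySem.Chars.find it [' '] =
      if ' ' ∈ it then ((it.findIdx (· == ' ') : Nat) : Int) else -1 := by
  rw [PySem.Chars.find, pvFind_go_space]
  simp

theorem pvSmax_go_zero (fuel : Nat) (l : List Char) (acc : List (List Char)) :
    PySem.Chars.splitOnMax.go [' '] fuel 0 l [] acc = (l :: acc).reverse := by
  cases fuel with
  | zero => simp [PySem.Chars.splitOnMax.go]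
  | succ f =>
    cases l with
    | nil => simp [PySem.Chars.splitOnMax.go]
    | cons c r => simp [PySem.Chars.splitOnMax.go]

theorem pvSmax_go_one (it : List Char) (fuel : Nat) (cur : List Char) (acc : List (List Char))
    (h : it.length < fuel) :
    PySem.Chars.splitOnMax.go [' '] fuel 1 it cur acc =
      if ' ' ∈ it then
        acc.reverse ++ [cur.reverse ++ it.take (it.findIdx (· == ' ')),
                        it.drop (it.findIdx (· == ' ') + 1)]
      else acc.reverse ++ [cur.reverse ++ it] := by
  induction it generalizing fuel cur acc with
  | nil =>
    cases fuel with
    | zero => omega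
    | succ f => simp [PySem.Chars.splitOnMax.go]
  | cons c t ih =>
    cases fuel with
    | zero => omega
    | succ f =>
      rw [PySem.Chars.splitOnMax.go]
      by_cases hc : c = ' '
      · subst hc
        have hpre : List.isPrefixOf [' '] (' ' :: t) = true := by simp [List.isPrefixOf]
        simp only [hpre, if_true, one_ne_zero, if_false, List.drop_succ_cons,
          List.length_cons] at *
        rw [pvSmax_go_zero]
        simp [List.findIdx_cons]
      · have hb : (c == ' ') = false := beq_eq_false_iff_ne.mpr hc
        have hb2 : (' ' == c) = false := beq_eq_false_iff_ne.mpr (Ne.symm hc)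
        have hpre : List.isPrefixOf [' '] (c :: t) = false := by simp [List.isPrefixOf, hb2]
        rw [hpre]
        simp only [Bool.false_eq_true, if_false, one_ne_zero]
        have ht : t.length < f := by simp at h; omega
        rw [ih f (c :: cur) acc ht]
        by_cases hm : ' ' ∈ t
        · have hm2 : ' ' ∈ c :: t := List.mem_cons_of_mem _ hm
          rw [if_pos hm, if_pos hm2, List.findIdx_cons, hb]
          simp only [cond_false, List.reverse_cons, List.take_succ_cons, List.drop_succ_cons,
            List.append_assoc, List.singleton_append]
        · have hm2 : ' ' ∉ c :: t := by
            intro hx; rcases List.mem_cons.mp hx with h1 | h2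
            · exact hc h1.symm
            · exact hm h2
          rw [if_neg hm, if_neg hm2]
          simp

theorem pvSmax_space (it : List Char) :
    PySem.Chars.splitOnMax it [' '] 1 =
      if ' ' ∈ it then [it.take (it.findIdx (· == ' ')), it.drop (it.findIdx (· == ' ') + 1)]
      else [it] := by
  rw [PySem.Chars.splitOnMax]
  norm_num
  rw [pvSmax_go_one it (it.length + 1) [] [] (by omega)]
  split <;> simp

theorem pvItemA_eq (d : PySem.Dict String String) (item0 : List Char) :
    pvItemA d item0 = pvH d (PySem.Chars.strip item0) := by
  simp only [pvItemA, pvH, pvG]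
  generalize PySem.Chars.strip item0 = it
  by_cases hm : ' ' ∈ it
  · have hne : it.isEmpty = false := by
      cases it with
      | nil => simp at hm
      | cons a b => simp
    rw [hne]
    simp only [Bool.false_eq_true, if_false, pvSmax_space, if_pos hm]
  · rw [pvSmax_space, if_neg hm]
    simp only [if_neg hm]
    split <;> rfl

theorem pvFlush_eq (d : PySem.Dict String String) (buf : List Char) :
    pvFlush d buf = pvH d (PySem.Chars.strip buf) := by
  simp only [pvFlush, pvH, pvG]
  generalize PySem.Chars.strip buf = it
  rw [pvFind_space]
  by_cases hm : ' ' ∈ it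
  · rw [if_pos hm, if_pos hm]
    have h1 : ((it.findIdx (· == ' ') : Nat) : Int) ≠ -1 := by omega
    rw [if_pos h1]
    have h2 : PySem.Chars.slice it none (some ((it.findIdx (· == ' ') : Nat) : Int)) =
        it.take (it.findIdx (· == ' ')) := by
      rw [PySem.Chars.slice_eq_listSlice, PySem.List.slice_to it (by omega)]
      norm_num
    have h3 : PySem.Chars.slice it (some (((it.findIdx (· == ' ') : Nat) : Int) + 1)) none =
        it.drop (it.findIdx (· == ' ') + 1) := by
      rw [PySem.Chars.slice_eq_listSlice, PySem.List.slice_from it (by omega)]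
      norm_num
    rw [h2, h3]
  · rw [if_neg hm, if_neg hm]
    simp

theorem pvSplitOn_go_semi (cs : List Char) (fuel : Nat) (cur : List Char) (acc : List (List Char))
    (h : cs.length < fuel) :
    PySem.Chars.splitOn.go [';'] fuel cs cur acc =
      acc.reverse ++ (List.splitOnP (· == ';') cs).modifyHead (cur.reverse ++ ·) := by
  induction cs generalizing fuel cur acc with
  | nil =>
    cases fuel with
    | zero => omega
    | succ f => simp [PySem.Chars.splitOn.go, List.splitOnP_nil]
  | cons c t ih =>
    cases fuel with
    | zero => omega
    | succ f =>
      rw [PySem.Chars.splitOn.go]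
      have ht : t.length < f := by simp at h; omega
      by_cases hc : c = ';'
      · subst hc
        have hpre : List.isPrefixOf [';'] (';' :: t) = true := by simp [List.isPrefixOf]
        rw [hpre]
        simp only [if_true, List.length_singleton, List.drop_succ_cons, List.drop_zero]
        rw [ih f [] (cur.reverse :: acc) ht]
        obtain ⟨h0, tl, e⟩ := List.exists_cons_of_ne_nil (List.splitOnP_ne_nil (· == ';') t)
        rw [List.splitOnP_cons]
        simp [e]
      · have hb2 : (';' == c) = false := beq_eq_false_iff_ne.mpr (Ne.symm hc)
        have hb : (c == ';') = false := beq_eq_false_iff_ne.mpr hc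
        have hpre : List.isPrefixOf [';'] (c :: t) = false := by simp [List.isPrefixOf, hb2]
        rw [hpre]
        simp only [Bool.false_eq_true, if_false]
        rw [ih f (c :: cur) acc ht, List.splitOnP_cons]
        obtain ⟨h0, tl, e⟩ := List.exists_cons_of_ne_nil (List.splitOnP_ne_nil (· == ';') t)
        simp [e, hb]

theorem pvSplitOn_semi (cs : List Char) :
    PySem.Chars.splitOn cs [';'] = List.splitOnP (· == ';') cs := by
  rw [PySem.Chars.splitOn, pvSplitOn_go_semi cs (cs.length + 1) [] [] (by omega)]
  obtain ⟨h0, tl, e⟩ := List.exists_cons_of_ne_nil (List.splitOnP_ne_nil (· == ';') cs)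
  simp [e]

theorem pvSplitOnP_no_sep (buf : List Char) (h : ';' ∉ buf) :
    List.splitOnP (· == ';') buf = [buf] := by
  induction buf with
  | nil => simp [List.splitOnP_nil]
  | cons c t ih =>
    have hc : (c == ';') = false := beq_eq_false_iff_ne.mpr (fun e => h (e ▸ List.mem_cons_self))
    rw [List.splitOnP_cons, ih (fun hm => h (List.mem_cons_of_mem _ hm))]
    simp [hc]

theorem pvSplitOnP_sep (buf t : List Char) (h : ';' ∉ buf) :
    List.splitOnP (· == ';') (buf ++ ';' :: t) = buf :: List.splitOnP (· == ';') t := by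
  induction buf with
  | nil => simp [List.splitOnP_cons]
  | cons c r ih =>
    have hc : (c == ';') = false := beq_eq_false_iff_ne.mpr (fun e => h (e ▸ List.mem_cons_self))
    rw [List.cons_append, List.splitOnP_cons, ih (fun hm => h (List.mem_cons_of_mem _ hm))]
    simp [hc]

theorem pvFoldStep (cs : List Char) (d : PySem.Dict String String) (buf : List Char)
    (h : ';' ∉ buf) :
    ((cs ++ [';']).foldl pvStep (d, buf)).1 =
      (List.splitOnP (· == ';') (buf ++ cs)).foldl pvFlush d := by
  induction cs generalizing d buf with
  | nil =>
    simp [pvStep, pvSplitOnP_no_sep buf h]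
  | cons c t ih =>
    by_cases hc : c = ';'
    · subst hc
      rw [List.cons_append, List.foldl_cons]
      have hs : pvStep (d, buf) ';' = (pvFlush d buf, []) := by simp [pvStep]
      rw [hs, ih (pvFlush d buf) [] (by simp), pvSplitOnP_sep buf t h, List.foldl_cons]
      simp
    · rw [List.cons_append, List.foldl_cons]
      simp only [pvStep, if_neg hc]
      rw [ih d (buf ++ [c]) (by
        intro hm
        rcases List.mem_append.mp hm with h1 | h2
        · exact h h1
        · exact hc (List.mem_singleton.mp h2).symm)]
      simp

-- each item's contribution depends only on its stripped form
theorem pvFoldFlush_strip (l : List (List Char)) (d : PySem.Dict String String) :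
    l.foldl pvFlush d = (l.map PySem.Chars.strip).foldl pvH d := by
  rw [List.foldl_map]
  apply PySem.List.foldl_congr_mem
  intro d' it _
  exact pvFlush_eq d' it

theorem pvFoldItemA_strip (l : List (List Char)) (d : PySem.Dict String String) :
    l.foldl pvItemA d = (l.map PySem.Chars.strip).foldl pvH d := by
  rw [List.foldl_map]
  apply PySem.List.foldl_congr_mem
  intro d' it _
  exact pvItemA_eq d' it

theorem pvStrip_cons_space (w : Char) (h : PySem.Chars.isspace w = true) (l : List Char) :
    PySem.Chars.strip (w :: l) = PySem.Chars.strip l := by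
  simp [PySem.Chars.strip, PySem.Chars.lstrip, h]

theorem pvRstrip_concat_space (w : Char) (h : PySem.Chars.isspace w = true) (l : List Char) :
    PySem.Chars.rstrip (l ++ [w]) = PySem.Chars.rstrip l := by
  simp [PySem.Chars.rstrip, h]

theorem pvStrip_concat_space (w : Char) (h : PySem.Chars.isspace w = true) (l : List Char) :
    PySem.Chars.strip (l ++ [w]) = PySem.Chars.strip l := by
  rw [PySem.Chars.strip, PySem.Chars.strip, PySem.Chars.lstrip, PySem.Chars.lstrip,
    List.dropWhile_append]
  split
  · rename_i he
    rw [List.isEmpty_iff] at he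
    rw [he]
    simp [h]
  · exact pvRstrip_concat_space w h _

theorem pvSplitOnP_concat (p : Char → Bool) (xs : List Char) (c : Char) :
    List.splitOnP p (xs ++ [c]) =
      if p c then List.splitOnP p xs ++ [[]]
      else (List.splitOnP p xs).modifyLast (· ++ [c]) := by
  induction xs with
  | nil =>
    simp only [List.nil_append, List.splitOnP_cons, List.splitOnP_nil]
    split <;> rfl
  | cons x xs ih =>
    rw [List.cons_append, List.splitOnP_cons, ih, List.splitOnP_cons]
    obtain ⟨h0, tl, e⟩ := List.exists_cons_of_ne_nil (List.splitOnP_ne_nil p xs)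
    by_cases hc : p c
    · simp only [hc, if_true]
      by_cases hx : p x
      · simp [hx]
      · simp [hx, e]
    · simp only [hc, Bool.false_eq_true, if_false]
      by_cases hx : p x
      · simp only [hx, if_true]
        rcases List.eq_nil_or_concat (List.splitOnP p xs) with hnil | ⟨L, b, hLb⟩
        · exact absurd hnil (List.splitOnP_ne_nil p xs)
        · simp only [List.concat_eq_append] at hLb
          rw [hLb, ← List.cons_append, List.modifyLast_concat, ← List.cons_append,
            List.modifyLast_concat]
      · simp only [hx, Bool.false_eq_true, if_false]
        rcases List.eq_nil_or_concat tl with hnil | ⟨L, b, hLb⟩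
        · subst hnil
          rw [e]
          have m1 : List.modifyLast (fun z => z ++ [c]) [h0] = [h0 ++ [c]] := by
            simpa using List.modifyLast_concat (fun z => z ++ [c]) h0 []
          have m2 : List.modifyLast (fun z => z ++ [c]) [x :: h0] = [(x :: h0) ++ [c]] := by
            simpa using List.modifyLast_concat (fun z => z ++ [c]) (x :: h0) []
          rw [m1, List.modifyHead_cons, List.modifyHead_cons, m2]
          simp
        · simp only [List.concat_eq_append] at hLb
          rw [e, hLb]
          rw [show h0 :: (L ++ [b]) = (h0 :: L) ++ [b] from rfl, List.modifyLast_concat]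
          simp only [List.cons_append, List.modifyHead_cons]
          rw [show (x :: h0) :: (L ++ [b]) = ((x :: h0) :: L) ++ [b] from rfl,
            List.modifyLast_concat]
          simp

theorem pvMapStrip_prefix (pre cs : List Char) (h : ∀ w ∈ pre, PySem.Chars.isspace w = true) :
    (List.splitOnP (· == ';') (pre ++ cs)).map PySem.Chars.strip =
      (List.splitOnP (· == ';') cs).map PySem.Chars.strip := by
  induction pre with
  | nil => simp
  | cons w pre ih =>
    have hw : PySem.Chars.isspace w = true := h w (by simp)
    have hne : w ≠ ';' := by rintro rfl; exact absurd hw (by decide)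
    have hb : (w == ';') = false := beq_eq_false_iff_ne.mpr hne
    rw [List.cons_append, List.splitOnP_cons]
    simp only [hb, Bool.false_eq_true, if_false]
    obtain ⟨h0, tl, e⟩ := List.exists_cons_of_ne_nil (List.splitOnP_ne_nil (· == ';') (pre ++ cs))
    rw [e] at ih ⊢
    simp only [List.modifyHead_cons, List.map_cons, pvStrip_cons_space w hw]
    rw [← List.map_cons]
    exact ih (fun x hx => h x (by simp [hx]))

theorem pvMapStrip_suffix (cs suf : List Char) (h : ∀ w ∈ suf, PySem.Chars.isspace w = true) :
    (List.splitOnP (· == ';') (cs ++ suf)).map PySem.Chars.strip =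
      (List.splitOnP (· == ';') cs).map PySem.Chars.strip := by
  induction suf using List.reverseRecOn with
  | nil => simp
  | append_singleton ys y ih =>
    have hy : PySem.Chars.isspace y = true := h y (by simp)
    have hne : y ≠ ';' := by rintro rfl; exact absurd hy (by decide)
    have hb : (y == ';') = false := beq_eq_false_iff_ne.mpr hne
    rw [← List.append_assoc, pvSplitOnP_concat]
    simp only [hb, Bool.false_eq_true, if_false]
    rcases List.eq_nil_or_concat (List.splitOnP (· == ';') (cs ++ ys)) with hnil | ⟨L, b, hLb⟩
    · exact absurd hnil (List.splitOnP_ne_nil _ _)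
    · simp only [List.concat_eq_append] at hLb
      have ih' := ih (fun x hx => h x (by simp [hx]))
      rw [hLb, List.modifyLast_concat] at *
      simpa [pvStrip_concat_space y hy] using ih'

theorem pvMapStrip (cs : List Char) :
    (List.splitOnP (· == ';') (PySem.Chars.strip cs)).map PySem.Chars.strip =
      (List.splitOnP (· == ';') cs).map PySem.Chars.strip := by
  have hdec : cs = cs.takeWhile PySem.Chars.isspace ++
      (PySem.Chars.strip cs ++ ((PySem.Chars.lstrip cs).reverse.takeWhile PySem.Chars.isspace).reverse) := by
    conv_lhs => rw [← List.takeWhile_append_dropWhile (p := PySem.Chars.isspace) (l := cs)]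
    congr 1
    rw [PySem.Chars.strip]
    conv_lhs => rw [show List.dropWhile PySem.Chars.isspace cs = PySem.Chars.lstrip cs from rfl,
      ← List.reverse_reverse (PySem.Chars.lstrip cs),
      ← List.takeWhile_append_dropWhile (p := PySem.Chars.isspace) (l := (PySem.Chars.lstrip cs).reverse)]
    rw [List.reverse_append, PySem.Chars.rstrip]
  conv_rhs => rw [hdec]
  rw [pvMapStrip_prefix _ _ (fun w hw => List.mem_takeWhile_imp hw),
    pvMapStrip_suffix _ _ (fun w hw => List.mem_takeWhile_imp (List.mem_reverse.mp hw))]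

-- ===== VERDICT (by name: the statement is the Claim_ definition above) =====
theorem parse_gtf_attributes_spec : Claim_equal_parse_gtf_attributes := by
  intro s _
  unfold Spec_parse_gtf_attributes parse_gtf_attributes parse_gtf_attributes_alt
  have htl : (s ++ ";").toList = s.toList ++ [';'] := by
    simp [String.toList_append]
  rw [htl, pvFoldStep s.toList _ [] (by simp), List.nil_append, pvSplitOn_semi,
    pvFoldItemA_strip, pvFoldFlush_strip, pvMapStrip]
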